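-- pv_equiv track=rewrite | github.com/dexeme/boolean-functions-wiki | scrap/dependency_graph.py | connected_component_from_root
-- ===== SOURCE A (Python) =====
-- from collections import defaultdict, deque
--
-- def connected_component_from_root(adjacency: dict[str, set[str]], root: str) -> set[str]:
--     if root not in adjacency:
--         return set()
--
--     visited: set[str] = set()
--     queue: deque[str] = deque([root])
--
--     while queue:
--         node = queue.popleft()
--         if node in visited:
--             continue
--         visited.add(node)
--         for neighbor in adjacency.get(node, set()):
--             if neighbor not in visited:
--                 queue.append(neighbor)
--
--     return visited
-- ===== SOURCE B (Python) =====
-- def connected_component_from_root(adjacency: dict[str, set[str]], root: str) -> set[str]: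
--     if root not in adjacency:
--         return set()
--
--     visited: set[str] = {root}
--     frontier: set[str] = {root}
--
--     while frontier:
--         reachable: set[str] = set()
--         for node in frontier:
--             reachable |= adjacency.get(node, set())
--         frontier = reachable - visited
--         visited |= frontier
--
--     return visited
-- ===== Notes on version B (the rewrite author's own statement) =====
-- stated objective: alternative
-- what changed: A's node-at-a-time BFS with a deque and per-node visited checks is replaced by a level-synchronous BFS that repeatedly expands the whole frontier with bulk set union and set difference.
import Mathlib
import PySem

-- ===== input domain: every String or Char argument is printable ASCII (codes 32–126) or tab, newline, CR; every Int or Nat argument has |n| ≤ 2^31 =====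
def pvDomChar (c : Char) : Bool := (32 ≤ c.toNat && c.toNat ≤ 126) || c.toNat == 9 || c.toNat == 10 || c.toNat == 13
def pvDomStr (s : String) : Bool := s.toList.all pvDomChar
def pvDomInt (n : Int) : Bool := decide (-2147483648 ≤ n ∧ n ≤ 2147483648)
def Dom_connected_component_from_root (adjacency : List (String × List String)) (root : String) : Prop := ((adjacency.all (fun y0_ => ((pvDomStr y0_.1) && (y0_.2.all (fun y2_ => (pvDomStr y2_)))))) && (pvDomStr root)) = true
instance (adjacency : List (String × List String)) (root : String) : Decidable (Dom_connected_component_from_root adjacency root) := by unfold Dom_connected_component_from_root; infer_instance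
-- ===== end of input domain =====

-- B replaces A's node-at-a-time deque BFS by a level-synchronous BFS that expands the whole
-- frontier per iteration with bulk set union/difference; equal return value is proved.

-- shared helper: adjacency.get(node, set()) on the association list (first match)
def pvLookup (adjacency : List (String × List String)) (node : String) : List String :=
  match adjacency.find? (fun p => p.1 == node) with
  | some p => p.2
  | none => []

-- shared helper: 'node in adjacency'
def pvHasKey (adjacency : List (String × List String)) (node : String) : Bool :=
  adjacency.any (fun p => p.1 == node)

-- all neighbour values occurring in the adjacency dict (used only in termination measures)
def pvVals (adjacency : List (String × List String)) : List String :=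
  adjacency.flatMap (fun p => p.2)

def pvMeasureA (adjacency : List (String × List String)) (queue visited : List String) : Nat :=
  ((queue ++ pvVals adjacency).filter (fun x => !(PySem.Set.contains visited x))).toFinset.card

lemma pvLookup_mem_vals {adjacency : List (String × List String)} {n x : String}
    (hx : x ∈ pvLookup adjacency n) : x ∈ pvVals adjacency := by
  unfold pvLookup at hx
  unfold pvVals
  rcases h : adjacency.find? (fun p => p.1 == n) with _ | p
  · simp [h] at hx
  · rw [h] at hx
    exact List.mem_flatMap.mpr ⟨p, List.mem_of_find?_eq_some h, hx⟩

lemma pvMeasureA_le_cons (adjacency : List (String × List String)) (n : String)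
    (queue visited : List String) :
    pvMeasureA adjacency queue visited ≤ pvMeasureA adjacency (n :: queue) visited := by
  apply Finset.card_le_card
  intro x hx
  simp only [List.mem_toFinset, List.mem_filter, List.mem_append, List.mem_cons] at hx ⊢
  tauto

lemma pvMeasureA_add_lt (adjacency : List (String × List String)) (n : String)
    (queue visited : List String) (hn : n ∉ visited) :
    pvMeasureA adjacency
      (queue ++ (pvLookup adjacency n).filter
        (fun m => !(PySem.Set.contains (PySem.Set.add visited n) m)))
      (PySem.Set.add visited n)
    < pvMeasureA adjacency (n :: queue) visited := by
  apply Finset.card_lt_card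
  rw [PySem.Set.add_of_not_mem hn]
  constructor
  · intro x hx
    simp only [List.mem_toFinset, List.mem_filter, List.mem_append, List.mem_cons,
      PySem.Set.contains_eq_listContains, List.contains_eq_mem, Bool.not_eq_true',
      decide_eq_false_iff_not] at hx ⊢
    rcases hx with ⟨hmem, hnv⟩
    refine ⟨?_, fun h => hnv (Or.inl h)⟩
    rcases hmem with (hq | hf) | hv
    · tauto
    · exact Or.inr (pvLookup_mem_vals hf.1)
    · exact Or.inr hv
  · intro hsub
    have hn_in : n ∈ ((n :: queue ++ pvVals adjacency).filter
        (fun x => !(PySem.Set.contains visited x))).toFinset := by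
      simp [hn]
    have := hsub hn_in
    simp at this

-- ===== PORT A =====
def aLoop (adjacency : List (String × List String)) :
    List String → PySem.Set String → PySem.Set String
  | [], visited => visited
  | node :: queue, visited =>
    if h : PySem.Set.contains visited node then
      aLoop adjacency queue visited
    else
      let visited' := PySem.Set.add visited node
      aLoop adjacency
        (queue ++ (pvLookup adjacency node).filter (fun m => !(PySem.Set.contains visited' m)))
        visited'
termination_by q v => (pvMeasureA adjacency q v, q.length)
decreasing_by
  · rcases lt_or_eq_of_le (pvMeasureA_le_cons adjacency node queue visited) with hlt | heq
    · exact Prod.Lex.left _ _ hlt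
    · rw [heq]; exact Prod.Lex.right _ (by simp)
  · exact Prod.Lex.left _ _ (pvMeasureA_add_lt adjacency node queue visited (by simpa using h))

def connected_component_from_root (adjacency : List (String × List String)) (root : String) : List String :=
  if pvHasKey adjacency root then
    aLoop adjacency [root] PySem.Set.empty
  else
    PySem.Set.empty

-- ===== PORT B =====
def pvMeasureB (adjacency : List (String × List String)) (visited : List String) : Nat :=
  ((pvVals adjacency).filter (fun x => !(PySem.Set.contains visited x))).toFinset.card

lemma pvMeasureB_step (adjacency : List (String × List String))
    (frontier visited frontier' : List String) (hne : frontier ≠ [])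
    (hsub : ∀ x ∈ frontier', x ∈ pvVals adjacency ∧ x ∉ visited) :
    Prod.Lex (· < ·) (· < ·)
      (pvMeasureB adjacency (PySem.Set.union visited frontier'), frontier'.length)
      (pvMeasureB adjacency visited, frontier.length) := by
  have hunion : ∀ x, x ∈ PySem.Set.union visited frontier' ↔ x ∈ visited ∨ x ∈ frontier' :=
    fun x => PySem.Set.mem_union visited frontier' x
  rcases frontier' with _ | ⟨y, rest⟩
  · have : PySem.Set.union visited ([] : List String) = visited := rfl
    rw [this]
    exact Prod.Lex.right _ (by cases frontier with
      | nil => exact absurd rfl hne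
      | cons a l => simp)
  · apply Prod.Lex.left
    apply Finset.card_lt_card
    constructor
    · intro x hx
      simp only [List.mem_toFinset, List.mem_filter, PySem.Set.contains_eq_listContains,
        List.contains_eq_mem, Bool.not_eq_true', decide_eq_false_iff_not] at hx ⊢
      exact ⟨hx.1, fun hv => hx.2 ((hunion x).mpr (Or.inl hv))⟩
    · intro hcon
      have hy := hsub y List.mem_cons_self
      have hy_in : y ∈ ((pvVals adjacency).filter
          (fun z => !(PySem.Set.contains visited z))).toFinset := by
        simp [hy.1, hy.2]
      have := hcon hy_in
      simp only [List.mem_toFinset, List.mem_filter, PySem.Set.contains_eq_listContains,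
        List.contains_eq_mem, Bool.not_eq_true', decide_eq_false_iff_not] at this
      exact this.2 ((hunion y).mpr (Or.inr List.mem_cons_self))

lemma foldl_union_mem {α : Type} (adjacency : List (String × List String)) (f : α → List String)
    (hf : ∀ a y, y ∈ f a → y ∈ pvVals adjacency) (L : List α)
    (s : PySem.Set String) (x : String)
    (hx : x ∈ L.foldl (fun acc a => PySem.Set.union acc (f a)) s) :
    x ∈ s ∨ x ∈ pvVals adjacency := by
  induction L generalizing s with
  | nil => exact Or.inl hx
  | cons n L ih =>
    rcases ih _ hx with h | h
    · rcases (PySem.Set.mem_union _ _ _).mp h with h' | h'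
      · exact Or.inl h'
      · exact Or.inr (hf n x h')
    · exact Or.inr h

def bLoop (adjacency : List (String × List String))
    (frontier visited : PySem.Set String) : PySem.Set String :=
  if h : frontier.isEmpty then visited
  else
    let reachable := frontier.foldl
      (fun acc node => PySem.Set.union acc (pvLookup adjacency node)) PySem.Set.empty
    let frontier' := PySem.Set.diff reachable visited
    bLoop adjacency frontier' (PySem.Set.union visited frontier')
termination_by (pvMeasureB adjacency visited, frontier.length)
decreasing_by
  apply pvMeasureB_step adjacency frontier visited _ (by simpa using h)
  intro x hx
  have hx' := (PySem.Set.mem_diff _ _ _).mp hx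
  refine ⟨?_, hx'.2⟩
  rcases foldl_union_mem adjacency _ (fun a y hy => pvLookup_mem_vals hy) _ PySem.Set.empty x hx'.1 with h' | h'
  · simp [PySem.Set.empty] at h'
  · exact h'

def connected_component_from_root_alt (adjacency : List (String × List String)) (root : String) : List String :=
  if pvHasKey adjacency root then
    bLoop adjacency (PySem.Set.ofList [root]) (PySem.Set.ofList [root])
  else
    PySem.Set.empty

-- ===== PRECONDITION & SPEC =====
def Spec_connected_component_from_root (adjacency : List (String × List String)) (root : String) (out : List String) : Prop := out = connected_component_from_root_alt adjacency root
instance (adjacency : List (String × List String)) (root : String) (out : List String) : Decidable (Spec_connected_component_from_root adjacency root out) := by unfold Spec_connected_component_from_root; infer_instance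

-- ===== CLAIM (what is proved, stated in full; the proofs are below) =====
def Claim_equal_connected_component_from_root : Prop := ∀ (adjacency : List (String × List String)) (root : String), Dom_connected_component_from_root adjacency root → Spec_connected_component_from_root adjacency root (connected_component_from_root adjacency root)

-- ===== LEMMAS AND PROOFS =====

-- the nodes of q not yet in V, first occurrences in order (V grows along the scan)
def newNodes : List String → List String → List String
  | [], _ => []
  | n :: q, V => if PySem.Set.contains V n then newNodes q V else n :: newNodes q (V ++ [n])

-- one BFS "pass" of A over the current queue q: final visited list and the raw appended queue
def passA (adjacency : List (String × List String)) :
    List String → List String → List String × List String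
  | [], V => (V, [])
  | n :: q, V =>
    if PySem.Set.contains V n then passA adjacency q V
    else
      let V' := V ++ [n]
      let r := passA adjacency q V'
      (r.1, (pvLookup adjacency n).filter (fun m => !(PySem.Set.contains V' m)) ++ r.2)

lemma newNodes_cons_mem {n : String} {V : List String} (q : List String) (h : n ∈ V) :
    newNodes (n :: q) V = newNodes q V := by simp [newNodes, h]

lemma newNodes_cons_not_mem {n : String} {V : List String} (q : List String) (h : n ∉ V) :
    newNodes (n :: q) V = n :: newNodes q (V ++ [n]) := by simp [newNodes, h]

lemma passA_cons_mem (adjacency : List (String × List String)) {n : String} {V : List String}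
    (q : List String) (h : n ∈ V) :
    passA adjacency (n :: q) V = passA adjacency q V := by simp [passA, h]

lemma passA_cons_not_mem (adjacency : List (String × List String)) {n : String} {V : List String}
    (q : List String) (h : n ∉ V) :
    passA adjacency (n :: q) V
      = ((passA adjacency q (V ++ [n])).1,
         (pvLookup adjacency n).filter (fun m => !(PySem.Set.contains (V ++ [n]) m))
           ++ (passA adjacency q (V ++ [n])).2) := by
  simp only [passA]
  rw [if_neg (by simpa using h)]

lemma ofList_filter (l : List String) (p : String → Bool) :
    (PySem.Set.ofList l).filter p = PySem.Set.ofList (l.filter p) := by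
  induction l using List.reverseRecOn with
  | nil => rfl
  | append_singleton l x ih =>
    rw [PySem.Set.ofList_append_singleton, List.filter_append, PySem.Set.add_eq_ite]
    by_cases hmem : x ∈ PySem.Set.ofList l
    · rw [if_pos hmem, ih]
      by_cases hp : p x
      · simp only [List.filter_cons, List.filter_nil, hp, if_pos]
        rw [PySem.Set.ofList_append_singleton, PySem.Set.add_of_mem]
        rw [PySem.Set.mem_ofList]
        exact List.mem_filter.mpr ⟨(PySem.Set.mem_ofList _ _).mp hmem, hp⟩
      · simp [hp]
    · rw [if_neg hmem, List.filter_append, ih]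
      by_cases hp : p x
      · simp only [List.filter_cons, List.filter_nil, hp, if_pos]
        rw [PySem.Set.ofList_append_singleton, PySem.Set.add_of_not_mem]
        rw [PySem.Set.mem_ofList]
        intro hc
        exact hmem ((PySem.Set.mem_ofList _ _).mpr (List.mem_of_mem_filter hc))
      · simp [hp]

lemma newNodes_eq (l : List String) : ∀ V,
    newNodes l V = PySem.Set.ofList (l.filter (fun x => !(PySem.Set.contains V x))) := by
  induction l with
  | nil => intro V; rfl
  | cons n q ih =>
    intro V
    show (if PySem.Set.contains V n then newNodes q V else n :: newNodes q (V ++ [n])) = _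
    by_cases h : n ∈ V
    · rw [if_pos (by simpa using h), ih]
      simp [h]
    · rw [if_neg (by simpa using h), ih]
      have hpred : (fun x => !(PySem.Set.contains V x)) n = true := by simpa using h
      rw [show (n :: q).filter (fun x => !(PySem.Set.contains V x))
            = n :: q.filter (fun x => !(PySem.Set.contains V x)) from List.filter_cons_of_pos hpred,
          PySem.Set.ofList_cons]
      congr 1
      show PySem.Set.ofList _ = PySem.Set.discard _ n
      have hdisc : PySem.Set.discard (PySem.Set.ofList (q.filter (fun x => !(PySem.Set.contains V x)))) n
          = (PySem.Set.ofList (q.filter (fun x => !(PySem.Set.contains V x)))).filter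
              (fun y => !(y == n)) := rfl
      rw [hdisc, ofList_filter, List.filter_filter]
      congr 1
      apply List.filter_congr
      intro y _
      by_cases h1 : y = n <;> by_cases h2 : y ∈ V <;> simp [h1, h2]

lemma newNodes_mem {l V : List String} {x : String} (hx : x ∈ newNodes l V) :
    x ∈ l ∧ x ∉ V := by
  rw [newNodes_eq, PySem.Set.mem_ofList] at hx
  have := List.mem_filter.mp hx
  simpa using this

lemma newNodes_nodup (l V : List String) : (newNodes l V).Nodup := by
  rw [newNodes_eq]; exact PySem.Set.nodup_ofList _

lemma pass_fst (adjacency : List (String × List String)) (q : List String) : ∀ V,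
    (passA adjacency q V).1 = V ++ newNodes q V := by
  induction q with
  | nil => intro V; simp [passA, newNodes]
  | cons n q ih =>
    intro V
    by_cases h : n ∈ V
    · simp [passA, newNodes, h, ih]
    · simp [passA, newNodes, h, ih (V ++ [n])]

lemma pass_snd_vals (adjacency : List (String × List String)) (q : List String) : ∀ V x,
    x ∈ (passA adjacency q V).2 → x ∈ pvVals adjacency := by
  induction q with
  | nil => intro V x hx; simp [passA] at hx
  | cons n q ih =>
    intro V x hx
    by_cases h : n ∈ V
    · rw [passA_cons_mem adjacency q h] at hx
      exact ih V x hx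
    · rw [passA_cons_not_mem adjacency q h] at hx
      rcases List.mem_append.mp hx with hx | hx
      · exact pvLookup_mem_vals (List.mem_of_mem_filter hx)
      · exact ih (V ++ [n]) x hx

lemma pass_snd_filter (adjacency : List (String × List String)) (q : List String) : ∀ V,
    ((passA adjacency q V).2).filter
        (fun x => !(PySem.Set.contains (V ++ newNodes q V) x))
      = ((newNodes q V).flatMap (pvLookup adjacency)).filter
        (fun x => !(PySem.Set.contains (V ++ newNodes q V) x)) := by
  induction q with
  | nil => intro V; rfl
  | cons n q ih =>
    intro V
    by_cases h : n ∈ V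
    · rw [passA_cons_mem adjacency q h, newNodes_cons_mem q h]
      exact ih V
    · have hpass : (passA adjacency (n :: q) V).2
          = (pvLookup adjacency n).filter (fun m => !(PySem.Set.contains (V ++ [n]) m))
            ++ (passA adjacency q (V ++ [n])).2 := by
        rw [passA_cons_not_mem adjacency q h]
      have hnew : newNodes (n :: q) V = n :: newNodes q (V ++ [n]) :=
        newNodes_cons_not_mem q h
      have hV : V ++ n :: newNodes q (V ++ [n]) = (V ++ [n]) ++ newNodes q (V ++ [n]) := by
        simp
      rw [hpass, hnew, hV, List.filter_append]
      have h1 : ((pvLookup adjacency n).filter (fun m => !(PySem.Set.contains (V ++ [n]) m))).filter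
            (fun x => !(PySem.Set.contains ((V ++ [n]) ++ newNodes q (V ++ [n])) x))
          = (pvLookup adjacency n).filter
            (fun x => !(PySem.Set.contains ((V ++ [n]) ++ newNodes q (V ++ [n])) x)) := by
        rw [List.filter_filter]
        apply List.filter_congr
        intro y _
        by_cases hy : y ∈ (V ++ [n]) ++ newNodes q (V ++ [n])
        · simp only [List.mem_append] at hy
          by_cases h1 : y ∈ V <;> by_cases h2 : y = n <;> simp [h1, h2]
        · have hy' : y ∉ V ++ [n] := fun hc => hy (List.mem_append_left _ hc)
          simp [hy']
      rw [h1, ih (V ++ [n])]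
      have h2 : (n :: newNodes q (V ++ [n])).flatMap (pvLookup adjacency)
          = pvLookup adjacency n ++ (newNodes q (V ++ [n])).flatMap (pvLookup adjacency) := by
        simp
      rw [h2, List.filter_append]

lemma pass_of_newNodes_nil (adjacency : List (String × List String)) (q : List String) : ∀ V,
    newNodes q V = [] → passA adjacency q V = (V, []) := by
  induction q with
  | nil => intro V _; rfl
  | cons n q ih =>
    intro V hN
    by_cases h : n ∈ V
    · rw [newNodes_cons_mem q h] at hN
      rw [passA_cons_mem adjacency q h]
      exact ih V hN
    · rw [newNodes_cons_not_mem q h] at hN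
      exact absurd hN (List.cons_ne_nil _ _)

lemma aLoop_pass (adjacency : List (String × List String)) (q : List String) : ∀ r V,
    aLoop adjacency (q ++ r) V
      = aLoop adjacency (r ++ (passA adjacency q V).2) (passA adjacency q V).1 := by
  induction q with
  | nil => intro r V; simp [passA]
  | cons n q ih =>
    intro r V
    rw [List.cons_append, aLoop]
    by_cases h : n ∈ V
    · rw [dif_pos (by simpa using h), passA_cons_mem adjacency q h]
      exact ih r V
    · rw [dif_neg (by simpa using h), passA_cons_not_mem adjacency q h]
      have hadd : PySem.Set.add V n = V ++ [n] := PySem.Set.add_of_not_mem h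
      simp only [hadd]
      rw [List.append_assoc]
      rw [ih ((r ++ (pvLookup adjacency n).filter (fun m => !(PySem.Set.contains (V ++ [n]) m)))) (V ++ [n])]
      simp

lemma foldl_union_eq (adjacency : List (String × List String)) (L : List String) :
    ∀ s : PySem.Set String,
    L.foldl (fun acc n => PySem.Set.union acc (pvLookup adjacency n)) s
      = PySem.Set.update s (L.flatMap (pvLookup adjacency)) := by
  induction L with
  | nil => intro s; rfl
  | cons n L ih =>
    intro s
    rw [List.foldl_cons, ih, List.flatMap_cons, PySem.Set.update_append]
    rfl

lemma measureA_pass_lt (adjacency : List (String × List String)) (q V : List String)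
    (hN : newNodes q V ≠ []) :
    pvMeasureA adjacency (passA adjacency q V).2 (V ++ newNodes q V)
      < pvMeasureA adjacency q V := by
  obtain ⟨n₀, hn₀⟩ : ∃ x, x ∈ newNodes q V := by
    cases hcase : newNodes q V with
    | nil => exact absurd hcase hN
    | cons a _ => exact ⟨a, List.mem_cons_self ..⟩
  have hmem := newNodes_mem hn₀
  apply Finset.card_lt_card
  constructor
  · intro x hx
    simp only [List.mem_toFinset, List.mem_filter, List.mem_append,
      PySem.Set.contains_eq_listContains, List.contains_eq_mem, Bool.not_eq_true',
      decide_eq_false_iff_not] at hx ⊢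
    rcases hx with ⟨hmemx, hnv⟩
    refine ⟨?_, fun hc => hnv (Or.inl hc)⟩
    rcases hmemx with hp | hv
    · exact Or.inr (pass_snd_vals adjacency q V x hp)
    · exact Or.inr hv
  · intro hsub
    have hn_in : n₀ ∈ ((q ++ pvVals adjacency).filter
        (fun x => !(PySem.Set.contains V x))).toFinset := by
      simp [hmem.1, hmem.2]
    have := hsub hn_in
    simp only [List.mem_toFinset, List.mem_filter, PySem.Set.contains_eq_listContains,
      List.contains_eq_mem, Bool.not_eq_true', decide_eq_false_iff_not, List.mem_append] at this
    exact this.2 (Or.inr hn₀)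

lemma bLoop_step (adjacency : List (String × List String)) (F Vb : PySem.Set String)
    (hF : F.isEmpty = false) :
    bLoop adjacency F Vb
      = bLoop adjacency
          (PySem.Set.diff
            (F.foldl (fun acc node => PySem.Set.union acc (pvLookup adjacency node)) PySem.Set.empty) Vb)
          (PySem.Set.union Vb
            (PySem.Set.diff
              (F.foldl (fun acc node => PySem.Set.union acc (pvLookup adjacency node)) PySem.Set.empty) Vb)) := by
  rw [bLoop]
  rw [dif_neg (by simp [hF])]

lemma main_nil (adjacency : List (String × List String)) (q V : List String)
    (hN : newNodes q V = []) :
    aLoop adjacency q V = bLoop adjacency (newNodes q V) (V ++ newNodes q V) := by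
  rw [hN, List.append_nil]
  have h1 : aLoop adjacency q V = V := by
    have := aLoop_pass adjacency q [] V
    rw [List.append_nil, pass_of_newNodes_nil adjacency q V hN] at this
    simpa [aLoop] using this
  rw [h1, bLoop]
  simp

lemma measureA_pos (adjacency : List (String × List String)) (q V : List String)
    (hN : newNodes q V ≠ []) : 0 < pvMeasureA adjacency q V := by
  obtain ⟨n₀, hn₀⟩ : ∃ x, x ∈ newNodes q V := by
    cases hcase : newNodes q V with
    | nil => exact absurd hcase hN
    | cons a _ => exact ⟨a, List.mem_cons_self ..⟩
  have hmem := newNodes_mem hn₀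
  apply Finset.card_pos.mpr
  exact ⟨n₀, by simp [hmem.1, hmem.2]⟩

lemma main_lemma (adjacency : List (String × List String)) (k : Nat) :
    ∀ q V, pvMeasureA adjacency q V ≤ k →
    aLoop adjacency q V = bLoop adjacency (newNodes q V) (V ++ newNodes q V) := by
  induction k with
  | zero =>
    intro q V hk
    by_cases hN : newNodes q V = []
    · exact main_nil adjacency q V hN
    · exact absurd hk (by have := measureA_pos adjacency q V hN; omega)
  | succ k ih =>
    intro q V hk
    by_cases hN : newNodes q V = []
    · exact main_nil adjacency q V hN
    · have hlt := measureA_pass_lt adjacency q V hN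
      have hk' : pvMeasureA adjacency (passA adjacency q V).2 (V ++ newNodes q V) ≤ k := by omega
      have hL : aLoop adjacency q V
          = aLoop adjacency (passA adjacency q V).2 (V ++ newNodes q V) := by
        have := aLoop_pass adjacency q [] V
        rw [List.append_nil, List.nil_append, pass_fst] at this
        exact this
      rw [hL, ih _ _ hk']
      rw [bLoop_step adjacency (newNodes q V) (V ++ newNodes q V)
        (by simp [hN])]
      have hfront : PySem.Set.diff
          ((newNodes q V).foldl (fun acc node => PySem.Set.union acc (pvLookup adjacency node))
            PySem.Set.empty)
          (V ++ newNodes q V)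
          = newNodes (passA adjacency q V).2 (V ++ newNodes q V) := by
        rw [foldl_union_eq]
        show (PySem.Set.ofList ((newNodes q V).flatMap (pvLookup adjacency))).filter
            (fun x => !(PySem.Set.contains (V ++ newNodes q V) x)) = _
        rw [ofList_filter, ← pass_snd_filter adjacency q V, ← newNodes_eq]
      rw [hfront]
      have hunion : PySem.Set.union (V ++ newNodes q V)
            (newNodes (passA adjacency q V).2 (V ++ newNodes q V))
          = (V ++ newNodes q V) ++ newNodes (passA adjacency q V).2 (V ++ newNodes q V) := by
        show PySem.Set.update _ _ = _
        apply PySem.Set.update_eq_append_of_disjoint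
        · exact newNodes_nodup _ _
        · exact fun x hx => (newNodes_mem hx).2
      rw [hunion]

-- ===== VERDICT (by name: the statement is the Claim_ definition above) =====
theorem connected_component_from_root_spec : Claim_equal_connected_component_from_root := by
  intro adjacency root _
  unfold Spec_connected_component_from_root
  unfold connected_component_from_root connected_component_from_root_alt
  by_cases h : pvHasKey adjacency root = true
  · simp only [h, if_true]
    have hroot : newNodes [root] PySem.Set.empty = [root] := rfl
    have := main_lemma adjacency (pvMeasureA adjacency [root] PySem.Set.empty)
      [root] PySem.Set.empty le_rfl
    rw [hroot] at this
    exact this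
  · simp [h]
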